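-- pv_equiv track=rewrite | github.com/yezhichen2/stock | src/suangu2/main.py | create_p_data
-- ===== SOURCE A (Python) =====
-- def extract_pattern_strs(letters, smax=5):
--     for ii in range(len(letters)):
--
--         ss = letters[ii: ii + smax]
--         if len(ss) < smax: break
--
--         yield ss
--
-- def create_p_data(letters, smax=5, x=3, y=2):
--     if x + y > smax: raise Exception("x,y, params err.")
--     p_data = {}
--     letters_list = [letters] if isinstance(letters, str) else letters
--     for _letters in letters_list:
--         for ss in extract_pattern_strs(_letters, smax=smax):
--             xn, ym = ss[:x], ss[-y:]
--
--             if xn not in p_data: p_data[xn] = {}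
--             if ym not in p_data[xn]: p_data[xn][ym] = 0
--
--             p_data[xn][ym] += 1
--
--     return p_data
-- ===== SOURCE B (Python) =====
-- def create_p_data(letters, smax=5, x=3, y=2):
--     if x + y > smax: raise Exception("x,y, params err.")
--     letters_list = [letters] if isinstance(letters, str) else letters
--     # pass 1: flat list of (prefix, suffix) pairs over full-length windows
--     pairs = []
--     for s in letters_list:
--         i = 0
--         while i < len(s):
--             ss = s[i:i + smax]
--             if len(ss) < smax: break
--             pairs.append((ss[:x], ss[-y:]))
--             i += 1
--     # pass 2: flat counts
--     counts = {}
--     for p in pairs: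
--         counts[p] = counts.get(p, 0) + 1
--     # pass 3: reshape into the nested dict by first-occurrence order
--     xns = list(dict.fromkeys(xn for xn, _ in pairs))
--     return {xn: {ym: counts[(xn, ym)]
--                  for ym in dict.fromkeys(ym2 for xn2, ym2 in pairs if xn2 == xn)}
--             for xn in xns}
-- ===== Notes on version B (the rewrite author's own statement) =====
-- stated objective: alternative
-- what changed: Instead of building the nested dict incrementally with membership tests and in-place increments per window, B makes three flat passes: collect all (prefix,suffix) window pairs into one list, count them in a flat dict keyed by the pair, then reshape into the nested dict via first-occurrence dedup comprehensions.
import Mathlib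
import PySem

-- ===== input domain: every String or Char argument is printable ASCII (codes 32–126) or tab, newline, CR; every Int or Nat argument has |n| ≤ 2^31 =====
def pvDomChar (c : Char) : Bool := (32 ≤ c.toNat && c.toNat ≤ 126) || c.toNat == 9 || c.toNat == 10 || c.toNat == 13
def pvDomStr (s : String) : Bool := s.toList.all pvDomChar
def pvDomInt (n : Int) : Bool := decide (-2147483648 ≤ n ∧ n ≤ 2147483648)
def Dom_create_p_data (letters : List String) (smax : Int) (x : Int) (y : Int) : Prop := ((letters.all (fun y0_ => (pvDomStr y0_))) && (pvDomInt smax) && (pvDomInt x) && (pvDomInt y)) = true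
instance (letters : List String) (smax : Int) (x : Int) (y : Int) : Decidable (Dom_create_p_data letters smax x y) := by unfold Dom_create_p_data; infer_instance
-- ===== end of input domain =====

-- B rebuilds the same nested prefix/suffix window counts in three flat passes (pair list, flat counter,
-- dedup-comprehension reshape) instead of A's per-window nested-dict mutation; objective: alternative (no speed claim).

-- ===== PORT A =====
-- extract_pattern_strs: yields letters[ii:ii+smax] for ii = 0,1,…, breaking at the first window shorter than smax
def pvAWinGo (s : List Char) (smax : Int) (ii : Nat) : Nat → List (List Char)
  | 0 => []
  | n + 1 =>
    let ss := PySem.List.slice s (some (ii : Int)) (some ((ii : Int) + smax))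
    if (ss.length : Int) < smax then []
    else ss :: pvAWinGo s smax (ii + 1) n

-- the body of A's inner loop: the two membership tests, the two initialising inserts, then += 1
def pvAStep (x y : Int) (d : PySem.Dict (List Char) (PySem.Dict (List Char) Int)) (ss : List Char) :
    PySem.Dict (List Char) (PySem.Dict (List Char) Int) :=
  let xn := PySem.List.slice ss none (some x)
  let ym := PySem.List.slice ss (some (-y)) none
  let d1 := if d.contains xn then d else d.insert xn PySem.Dict.empty
  let inner := d1.getD xn PySem.Dict.empty
  let i1 := if inner.contains ym then inner else inner.insert ym 0
  d1.insert xn (i1.insert ym (i1.getD ym 0 + 1))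

-- Python raises "x,y, params err." when x + y > smax: excluded by Pre_; the port returns [] there
def create_p_data (letters : List String) (smax : Int) (x : Int) (y : Int) : List (String × List (String × Int)) :=
  if x + y > smax then []
  else
    let pd := letters.foldl
      (fun d s => (pvAWinGo s.toList smax 0 s.toList.length).foldl (pvAStep x y) d)
      PySem.Dict.empty
    pd.items.map (fun p => (String.ofList p.1, p.2.items.map (fun q => (String.ofList q.1, q.2))))

-- ===== PORT B =====
-- B pass 1 inner while-loop: the (window[:x], window[-y:]) pair of each full-length window
def pvBPairsGo (smax x y : Int) (s : List Char) (ii : Nat) : Nat → List (List Char × List Char)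
  | 0 => []
  | n + 1 =>
    let ss := PySem.List.slice s (some (ii : Int)) (some ((ii : Int) + smax))
    if (ss.length : Int) < smax then []
    else (PySem.List.slice ss none (some x), PySem.List.slice ss (some (-y)) none)
        :: pvBPairsGo smax x y s (ii + 1) n

def create_p_data_alt (letters : List String) (smax : Int) (x : Int) (y : Int) : List (String × List (String × Int)) :=
  if x + y > smax then []
  else
    let pairs := letters.foldl (fun acc s => acc ++ pvBPairsGo smax x y s.toList 0 s.toList.length) []
    let counts := pairs.foldl (fun d p => d.insert p (d.getD p 0 + 1))
      (PySem.Dict.empty : PySem.Dict (List Char × List Char) Int)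
    let xns := PySem.List.dedup (pairs.map (·.1))
    xns.map (fun xn =>
      (String.ofList xn,
       (PySem.List.dedup ((pairs.filter (fun p => p.1 == xn)).map (·.2))).map
         (fun ym => (String.ofList ym, counts.getD (xn, ym) 0))))

-- ===== PRECONDITION & SPEC =====
-- Pre_ excludes exactly the inputs where A raises Exception("x,y, params err."), i.e. x + y > smax
def Pre_create_p_data (letters : List String) (smax : Int) (x : Int) (y : Int) : Prop := x + y ≤ smax
instance (letters : List String) (smax : Int) (x : Int) (y : Int) : Decidable (Pre_create_p_data letters smax x y) := by unfold Pre_create_p_data; infer_instance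
def pvWitness_create_p_data : List String × Int × Int × Int := (["abcab", "bcabc"], 3, 2, 1)
def Spec_create_p_data (letters : List String) (smax : Int) (x : Int) (y : Int) (out : List (String × List (String × Int))) : Prop := out = create_p_data_alt letters smax x y
instance (letters : List String) (smax : Int) (x : Int) (y : Int) (out : List (String × List (String × Int))) : Decidable (Spec_create_p_data letters smax x y out) := by unfold Spec_create_p_data; infer_instance

-- ===== CLAIM (what is proved, stated in full; the proofs are below) =====
def Claim_equal_create_p_data : Prop := ∀ (letters : List String) (smax : Int) (x : Int) (y : Int), Dom_create_p_data letters smax x y → Pre_create_p_data letters smax x y → Spec_create_p_data letters smax x y (create_p_data letters smax x y)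

-- ===== LEMMAS AND PROOFS =====

-- generic "mapped dict" helpers
theorem pv_keys_mk_map {ν : Type} (K : List (List Char)) (g : List Char → ν) :
    (PySem.Dict.mk (K.map (fun k => (k, g k)))).keys = K := by
  simp only [PySem.Dict.keys_mk, List.map_map]
  exact List.map_id K

theorem pv_contains_mk_map {ν : Type} (K : List (List Char)) (g : List Char → ν) (a : List Char) :
    (PySem.Dict.mk (K.map (fun k => (k, g k)))).contains a = decide (a ∈ K) := by
  rw [PySem.Dict.contains_eq_decide_mem_keys, pv_keys_mk_map]

theorem pv_getD_mk_map {ν : Type} (K : List (List Char)) (g : List Char → ν) (hK : K.Nodup)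
    (a : List Char) (ha : a ∈ K) (dflt : ν) :
    (PySem.Dict.mk (K.map (fun k => (k, g k)))).getD a dflt = g a := by
  apply PySem.Dict.getD_of_mem_items
  · exact List.mem_map_of_mem ha
  · rw [pv_keys_mk_map]; exact hK

theorem pv_insert_mk_map_mem {ν : Type} (K : List (List Char)) (g : List Char → ν)
    (a : List Char) (ha : a ∈ K) (v : ν) :
    (PySem.Dict.mk (K.map (fun k => (k, g k)))).insert a v
      = PySem.Dict.mk (K.map (fun k => (k, if k = a then v else g k))) := by
  apply PySem.Dict.ext
  rw [PySem.Dict.items_insert_of_contains]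
  · show (K.map (fun k => (k, g k))).map _ = _
    rw [List.map_map]
    apply List.map_congr_left
    intro k _
    by_cases h : k = a
    · subst h; simp
    · simp [h]
  · rw [pv_contains_mk_map]; simpa using ha

theorem pv_insert_mk_map_not_mem {ν : Type} (K : List (List Char)) (g : List Char → ν)
    (a : List Char) (ha : a ∉ K) (v : ν) :
    (PySem.Dict.mk (K.map (fun k => (k, g k)))).insert a v
      = PySem.Dict.mk ((K ++ [a]).map (fun k => (k, if k = a then v else g k))) := by
  apply PySem.Dict.ext
  rw [PySem.Dict.items_insert_of_not_contains]
  · show K.map (fun k => (k, g k)) ++ [(a, v)] = _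
    rw [List.map_append]
    congr 1
    · apply List.map_congr_left
      intro k hk
      have : k ≠ a := fun h => ha (h ▸ hk)
      simp [this]
    · simp
  · rw [pv_contains_mk_map]; simpa using ha

def pvPStep (d : PySem.Dict (List Char) (PySem.Dict (List Char) Int)) (p : List Char × List Char) :
    PySem.Dict (List Char) (PySem.Dict (List Char) Int) :=
  let d1 := if d.contains p.1 then d else d.insert p.1 PySem.Dict.empty
  let inner := d1.getD p.1 PySem.Dict.empty
  let i1 := if inner.contains p.2 then inner else inner.insert p.2 0
  d1.insert p.1 (i1.insert p.2 (i1.getD p.2 0 + 1))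

def pvCanonInner (L : List (List Char × List Char)) (k : List Char) : PySem.Dict (List Char) Int :=
  PySem.Dict.mk ((PySem.Set.ofList ((L.filter (fun p => p.1 == k)).map (·.2))).map
    (fun m => (m, (L.count (k, m) : Int))))

def pvCanon (L : List (List Char × List Char)) : PySem.Dict (List Char) (PySem.Dict (List Char) Int) :=
  PySem.Dict.mk ((PySem.Set.ofList (L.map (·.1))).map (fun k => (k, pvCanonInner L k)))

theorem pv_pair_mem_iff (L : List (List Char × List Char)) (a b : List Char) :
    (a, b) ∈ L ↔ b ∈ (L.filter (fun p => p.1 == a)).map (·.2) := by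
  simp only [List.mem_map, List.mem_filter]
  constructor
  · intro h; exact ⟨(a, b), ⟨h, by simp⟩, rfl⟩
  · rintro ⟨⟨a', b'⟩, ⟨hm, he⟩, rfl⟩
    simp only [beq_iff_eq] at he
    simpa [he] using hm

theorem pv_inner_ne (L : List (List Char × List Char)) (a b k : List Char) (h : k ≠ a) :
    pvCanonInner (L ++ [(a, b)]) k = pvCanonInner L k := by
  unfold pvCanonInner
  have hf : (L ++ [(a, b)]).filter (fun p => p.1 == k) = L.filter (fun p => p.1 == k) := by
    rw [List.filter_append]
    simp [Ne.symm h]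
  rw [hf]
  congr 1
  apply List.map_congr_left
  intro m _
  have : ((a, b) : List Char × List Char) ≠ (k, m) := by
    intro he; exact h (congrArg Prod.fst he).symm
  simp [List.count_append, this]

theorem pv_step_canon (L : List (List Char × List Char)) (p : List Char × List Char) :
    pvPStep (pvCanon L) p = pvCanon (L ++ [p]) := by
  obtain ⟨a, b⟩ := p
  have hKnd : (PySem.Set.ofList (L.map (·.1))).Nodup := PySem.Set.nodup_ofList _
  by_cases ha : a ∈ L.map (·.1)
  · -- a is an existing outer key
    have haK : a ∈ PySem.Set.ofList (L.map (·.1)) := by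
      rw [PySem.Set.mem_ofList]; exact ha
    have hMnd : (PySem.Set.ofList ((L.filter (fun p => p.1 == a)).map (·.2))).Nodup :=
      PySem.Set.nodup_ofList _
    have hK' : PySem.Set.ofList ((L ++ [(a, b)]).map (·.1))
        = PySem.Set.ofList (L.map (·.1)) := by
      rw [List.map_append]
      simp only [List.map_cons, List.map_nil]
      rw [PySem.Set.ofList_append_singleton]
      exact PySem.Set.add_of_mem haK
    have hflt : (L ++ [(a, b)]).filter (fun p => p.1 == a)
        = L.filter (fun p => p.1 == a) ++ [(a, b)] := by
      rw [List.filter_append]; simp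
    unfold pvPStep pvCanon
    simp only [pv_contains_mk_map, decide_eq_true_eq, haK, if_true]
    rw [pv_getD_mk_map _ _ hKnd a haK]
    have hInner : pvCanonInner L a
        = PySem.Dict.mk ((PySem.Set.ofList ((L.filter (fun p => p.1 == a)).map (·.2))).map
            (fun m => (m, (L.count (a, m) : Int)))) := rfl
    rw [hInner, pv_contains_mk_map]
    by_cases hb : b ∈ PySem.Set.ofList ((L.filter (fun p => p.1 == a)).map (·.2))
    · -- existing suffix key
      simp only [hb, decide_true, if_true]
      rw [pv_getD_mk_map _ _ hMnd b hb, pv_insert_mk_map_mem _ _ b hb,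
          pv_insert_mk_map_mem _ _ a haK, hK']
      congr 1
      apply List.map_congr_left
      intro k hk
      by_cases hka : k = a
      · subst hka
        simp only [if_true]
        congr 1
        unfold pvCanonInner
        rw [hflt, List.map_append]
        simp only [List.map_cons, List.map_nil]
        rw [PySem.Set.ofList_append_singleton, PySem.Set.add_of_mem hb]
        congr 1
        apply List.map_congr_left
        intro m hm
        by_cases hmb : m = b
        · subst hmb
          simp [List.count_append]
        · have : ((k, b) : List Char × List Char) ≠ (k, m) := by
            intro he; exact hmb (congrArg Prod.snd he).symm
          simp [hmb, List.count_append, this]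
      · simp [hka, pv_inner_ne L a b k hka]
    · -- fresh suffix key
      simp only [hb, decide_false, Bool.false_eq_true, if_false]
      rw [pv_insert_mk_map_not_mem _ _ b hb]
      have hnd2 : (PySem.Set.ofList ((L.filter (fun p => p.1 == a)).map (·.2)) ++ [b]).Nodup := by
        refine hMnd.append (List.nodup_singleton b) ?_
        intro z hz hzm
        rw [List.mem_singleton] at hzm
        exact hb (hzm ▸ hz)
      have hm2 : b ∈ PySem.Set.ofList ((L.filter (fun p => p.1 == a)).map (·.2)) ++ [b] := by simp
      rw [pv_getD_mk_map _ _ hnd2 b hm2]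
      simp only [if_true]
      rw [pv_insert_mk_map_mem _ _ b hm2, pv_insert_mk_map_mem _ _ a haK, hK']
      congr 1
      apply List.map_congr_left
      intro k hk
      by_cases hka : k = a
      · subst hka
        simp only [if_true]
        congr 1
        unfold pvCanonInner
        have hMs' : PySem.Set.ofList (((L.filter (fun p => p.1 == k)) ++ [(k, b)]).map (·.2))
            = PySem.Set.ofList ((L.filter (fun p => p.1 == k)).map (·.2)) ++ [b] := by
          rw [List.map_append]
          simp only [List.map_cons, List.map_nil]
          rw [PySem.Set.ofList_append_singleton]
          exact PySem.Set.add_of_not_mem hb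
        rw [hflt, hMs']
        congr 1
        simp only [List.map_append]
        simp only [List.map_cons, List.map_nil]
        congr 1
        · apply List.map_congr_left
          intro m hm
          have hmb : m ≠ b := fun he => hb (he ▸ hm)
          have hpne : ((k, b) : List Char × List Char) ≠ (k, m) := by
            intro he; exact hmb (congrArg Prod.snd he).symm
          simp [hmb, List.count_append, hpne]
        · have hnm : ((k, b) : List Char × List Char) ∉ L := by
            intro hmem
            exact hb (by rw [PySem.Set.mem_ofList]; exact (pv_pair_mem_iff L k b).mp hmem)
          simp [List.count_append, List.count_eq_zero.mpr hnm]
      · simp [hka, pv_inner_ne L a b k hka]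
  · -- a is a fresh outer key
    have haK : a ∉ PySem.Set.ofList (L.map (·.1)) := by
      rw [PySem.Set.mem_ofList]; exact ha
    unfold pvPStep pvCanon
    simp only [pv_contains_mk_map, decide_eq_true_eq, haK, if_false]
    rw [pv_insert_mk_map_not_mem _ _ a haK]
    have hnd' : (PySem.Set.ofList (L.map (·.1)) ++ [a]).Nodup := by
      refine hKnd.append (List.nodup_singleton a) ?_
      intro x hx hxm
      rw [List.mem_singleton] at hxm
      exact haK (hxm ▸ hx)
    have hmem' : a ∈ PySem.Set.ofList (L.map (·.1)) ++ [a] := by simp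
    rw [pv_getD_mk_map _ _ hnd' a hmem']
    simp only [if_true]
    rw [PySem.Dict.contains_empty]
    simp only [Bool.false_eq_true, if_false]
    have hie : (PySem.Dict.empty : PySem.Dict (List Char) Int).insert b 0
        = PySem.Dict.mk ([b].map (fun m => (m, (0 : Int)))) := by
      apply PySem.Dict.ext
      rw [PySem.Dict.items_insert_of_not_contains _ 0 (PySem.Dict.contains_empty b)]
      rfl
    rw [hie, pv_getD_mk_map [b] _ (List.nodup_singleton b) b (by simp),
        pv_insert_mk_map_mem [b] _ b (by simp), pv_insert_mk_map_mem _ _ a hmem']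
    -- RHS canonical form
    have hK' : PySem.Set.ofList ((L ++ [(a, b)]).map (·.1))
        = PySem.Set.ofList (L.map (·.1)) ++ [a] := by
      rw [List.map_append]
      simp only [List.map_cons, List.map_nil]
      rw [PySem.Set.ofList_append_singleton]
      exact PySem.Set.add_of_not_mem haK
    rw [hK']
    congr 1
    apply List.map_congr_left
    intro k hk
    by_cases hka : k = a
    · subst hka
      congr 1
      unfold pvCanonInner
      have hfl : L.filter (fun p => p.1 == k) = [] := by
        rw [List.filter_eq_nil_iff]
        intro u hu hbe
        exact absurd ((beq_iff_eq).mp hbe ▸ List.mem_map_of_mem (f := (·.1)) hu) ha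
      have hnm : ((k, b) : List Char × List Char) ∉ L := fun hm =>
        ha (by simpa using List.mem_map_of_mem (f := (·.1)) hm)
      rw [List.filter_append, hfl]
      have hob : PySem.Set.ofList [b] = [b] :=
        PySem.Set.ofList_eq_self_of_nodup [b] (List.nodup_singleton b)
      simp [hob, List.count_eq_zero.mpr hnm]
    · have hkK : k ∈ PySem.Set.ofList (L.map (·.1)) := by
        rcases List.mem_append.mp hk with h | h
        · exact h
        · exact absurd (by simpa using h) hka
      simp [hka, pv_inner_ne L a b k hka]

theorem pvBPairsGo_eq_map (smax x y : Int) (s : List Char) :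
    ∀ (n ii : Nat), pvBPairsGo smax x y s ii n =
      (pvAWinGo s smax ii n).map
        (fun ss => (PySem.List.slice ss none (some x), PySem.List.slice ss (some (-y)) none)) := by
  intro n
  induction n with
  | zero => intro ii; rfl
  | succ n ih =>
    intro ii
    simp only [pvBPairsGo, pvAWinGo]
    by_cases h : ((PySem.List.slice s (some (ii : Int)) (some ((ii : Int) + smax))).length : Int) < smax
    · simp [h]
    · simp [h, ih (ii + 1)]

theorem pv_fold_eq_canon (L : List (List Char × List Char)) :
    L.foldl pvPStep PySem.Dict.empty = pvCanon L := by
  induction L using List.reverseRecOn with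
  | nil => rfl
  | append_singleton L p ih =>
    rw [List.foldl_append]
    simp only [List.foldl_cons, List.foldl_nil]
    rw [ih]
    exact pv_step_canon L p

theorem pv_fold_concat (ps : String → List (List Char × List Char)) :
    ∀ (letters : List String) (L0 : List (List Char × List Char)),
      letters.foldl (fun d s => (ps s).foldl pvPStep d) (L0.foldl pvPStep PySem.Dict.empty)
        = (letters.foldl (fun acc s => acc ++ ps s) L0).foldl pvPStep PySem.Dict.empty := by
  intro letters
  induction letters with
  | nil => intro L0; rfl
  | cons s rest ih =>
    intro L0
    simp only [List.foldl_cons]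
    rw [← List.foldl_append]
    exact ih (L0 ++ ps s)

theorem pv_outer_fold (letters : List String) (smax x y : Int) :
    letters.foldl
      (fun d s => (pvAWinGo s.toList smax 0 s.toList.length).foldl (pvAStep x y) d)
      PySem.Dict.empty
    = (letters.foldl (fun acc s => acc ++ pvBPairsGo smax x y s.toList 0 s.toList.length) []).foldl
        pvPStep PySem.Dict.empty := by
  have hstep : (fun (d : PySem.Dict (List Char) (PySem.Dict (List Char) Int)) (s : String) =>
        (pvAWinGo s.toList smax 0 s.toList.length).foldl (pvAStep x y) d)
      = fun d s => (pvBPairsGo smax x y s.toList 0 s.toList.length).foldl pvPStep d := by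
    funext d s
    rw [pvBPairsGo_eq_map, List.foldl_map]
    rfl
  rw [hstep]
  exact pv_fold_concat (fun s => pvBPairsGo smax x y s.toList 0 s.toList.length) letters []

-- ===== VERDICT (by name: the statement is the Claim_ definition above) =====
theorem create_p_data_spec : Claim_equal_create_p_data := by
  intro letters smax x y _ hpre
  show create_p_data letters smax x y = create_p_data_alt letters smax x y
  unfold create_p_data create_p_data_alt
  have hno : ¬ (x + y > smax) := not_lt.mpr hpre
  rw [if_neg hno, if_neg hno]
  rw [pv_outer_fold letters smax x y, pv_fold_eq_canon]
  simp only [pvCanon, pvCanonInner, List.map_map, PySem.List.dedup_eq_ofList,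
    PySem.Dict.getD_foldl_insert_add_one, PySem.Dict.getD_empty, Function.comp_def, zero_add]
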